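/- GENERATED by farm/mkstatement.py from design/units.tsv (unit `malloc`) and the Specs of ProgX/Base/Spec/*.lean — do not edit.
   THE STATEMENT of the proof unit `malloc`: the function `malloc` (10 instructions) satisfies its contract,
   given the contracts of its callees. What the names mean: ProgX/Base/Spec/Basic.lean. The theorem to prove:
   `theorem malloc_ok : ProgX.Base.Spec.malloc.Statement`. -/
import ProgX.Base.Spec.Heap
namespace ProgX.Base.Spec.malloc
open X86 X86.User Asan

/-- The statement of unit `malloc`. -/
def Statement : Prop :=
  ∀ (Lay : Layout) (_hLay : Lay.hi = 0x1000000) (μ : Microarch) (_hμ : UserX.MicroOK μ) (u₀ : State)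
    (_hcode : HasCodeNat Lay u₀ ProgX.Base.L.malloc.entry ProgX.Base.Code.code_malloc.nat ProgX.Base.L.malloc.size)
    (_h_heap_alloc : ∀ (H : Heap) (rest : List Obj) (frames : List (Nat × FrameLayout)), Calls Lay μ ProgX.Base.WayInv (ProgX.Base.conv u₀) ProgX.Base.L.heap_alloc.entry (ProgX.Base.Spec.heap_alloc.spec H rest frames)),
    ∀ (H : Heap) (rest : List Obj) (frames : List (Nat × FrameLayout)), Calls Lay μ ProgX.Base.WayInv (ProgX.Base.conv u₀) ProgX.Base.L.malloc.entry (ProgX.Base.Spec.malloc.spec H rest frames)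

end ProgX.Base.Spec.malloc
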